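-- pv_equiv track=rewrite | github.com/dbelpaum/boot2root | scripts/p5_bomb.py | generate_all_solutions
-- ===== SOURCE A (Python) =====
-- import itertools
--
-- def find_chars_for_index(index):
--     chars = []
--     for i in range(97, 123):
--         if (i & 0xf) == index:
--             chars.append(chr(i))
--     return chars
--
-- def generate_all_solutions(target):
--     static_string = "isrveawhobpnutfg"
--     result_lists = []
--
--     for char in target:
--         index = static_string.index(char)
--         result_lists.append(find_chars_for_index(index))
--
--     all_combinations = list(itertools.product(*result_lists))
--     return [''.join(combination) for combination in all_combinations]
-- ===== SOURCE B (Python) =====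
-- def generate_all_solutions(target):
--     static_string = "isrveawhobpnutfg"
--     result = ['']
--     for char in target:
--         index = static_string.index(char)
--         chars = [c for c in "abcdefghijklmnopqrstuvwxyz" if ord(c) & 0xf == index]
--         result = [prefix + c for prefix in result for c in chars]
--     return result
-- ===== Notes on version B (the rewrite author's own statement) =====
-- stated objective: alternative
-- what changed: Replaces building all per-character candidate lists and one itertools.product call with a single left-to-right fold that extends a growing list of partial combination strings, computing each character's candidates by filtering the lowercase alphabet inline.
import Mathlib
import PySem

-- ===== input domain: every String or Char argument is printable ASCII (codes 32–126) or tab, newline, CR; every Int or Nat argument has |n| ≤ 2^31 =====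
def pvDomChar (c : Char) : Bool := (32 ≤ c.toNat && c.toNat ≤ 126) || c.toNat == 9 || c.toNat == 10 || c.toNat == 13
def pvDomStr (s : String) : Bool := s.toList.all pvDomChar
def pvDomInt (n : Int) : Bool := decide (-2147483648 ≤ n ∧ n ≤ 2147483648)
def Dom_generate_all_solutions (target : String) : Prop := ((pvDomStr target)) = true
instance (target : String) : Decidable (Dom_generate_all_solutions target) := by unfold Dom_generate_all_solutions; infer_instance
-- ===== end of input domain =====

-- B replaces the per-character candidate lists + itertools.product with one fold that
-- extends a growing list of partial combination strings (alternative decomposition, same cost).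
-- ===== PORT A =====
def findCharsForIndex (index : Int) : List Char :=
  (PySem.List.pyRange 97 123 1).foldl
    (fun chars i => if (PySem.Int.band i 15) == index then chars ++ [Char.ofNat i.toNat] else chars) []

-- static_string.index(char) raises ValueError when char is absent; Pre_ excludes exactly
-- those inputs, and inside Pre_ it equals PySem.Str.find (first occurrence, as Int).
-- itertools.product is ported by hand as the standard right fold (first axis varies slowest).
def generate_all_solutions (target : String) : List String :=
  let static_string := "isrveawhobpnutfg"
  let result_lists := target.toList.foldl
    (fun acc char =>
      acc ++ [findCharsForIndex (PySem.Str.find static_string (String.mk [char]))]) []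
  let all_combinations := result_lists.foldr
    (fun xs acc => xs.flatMap (fun x => acc.map (fun t => x :: t))) [[]]
  all_combinations.map (fun combination => String.mk combination)

-- ===== PORT B =====
def altCands (index : Int) : List Char :=
  "abcdefghijklmnopqrstuvwxyz".toList.filter (fun c => (PySem.Int.band (c.toNat : Int) 15) == index)

def generate_all_solutions_alt (target : String) : List String :=
  (target.toList.foldl
    (fun result char =>
      result.flatMap (fun pre =>
        (altCands (PySem.Str.find "isrveawhobpnutfg" (String.mk [char]))).map
          (fun c => pre ++ [c])))
    [[]]).map String.mk

-- ===== PRECONDITION & SPEC =====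
-- Pre_ excludes exactly the inputs where static_string.index(char) raises ValueError.
def Pre_generate_all_solutions (target : String) : Prop :=
  (target.toList.all (fun c => "isrveawhobpnutfg".toList.contains c)) = true
instance (target : String) : Decidable (Pre_generate_all_solutions target) := by
  unfold Pre_generate_all_solutions; infer_instance
def pvWitness_generate_all_solutions : String := "fig"

def Spec_generate_all_solutions (target : String) (out : List String) : Prop := out = generate_all_solutions_alt target
instance (target : String) (out : List String) : Decidable (Spec_generate_all_solutions target out) := by unfold Spec_generate_all_solutions; infer_instance

-- ===== CLAIM (what is proved, stated in full; the proofs are below) =====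
def Claim_equal_generate_all_solutions : Prop := ∀ (target : String), Dom_generate_all_solutions target → Pre_generate_all_solutions target → Spec_generate_all_solutions target (generate_all_solutions target)

-- ===== LEMMAS AND PROOFS =====

theorem cands_eq (i : Int) : findCharsForIndex i = altCands i := by
  have halpha : "abcdefghijklmnopqrstuvwxyz".toList
      = (PySem.List.pyRange 97 123 1).map (fun k => Char.ofNat k.toNat) := by decide
  unfold findCharsForIndex altCands
  rw [PySem.List.foldl_append_if, halpha, List.filter_map, List.nil_append]
  congr 1

def prodList (ls : List (List Char)) : List (List Char) :=
  ls.foldr (fun xs acc => xs.flatMap (fun x => acc.map (fun t => x :: t))) [[]]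

theorem fold_prod (g : Char → List Char) (l : List Char) (acc : List (List Char)) :
    l.foldl (fun result char => result.flatMap (fun p => (g char).map (fun c => p ++ [c]))) acc
      = acc.flatMap (fun p => (prodList (l.map g)).map (fun t => p ++ t)) := by
  induction l generalizing acc with
  | nil => simp [prodList]
  | cons ch l ih =>
      simp only [List.foldl_cons, ih, List.map_cons, prodList, List.foldr_cons]
      simp only [List.flatMap_assoc]
      congr 1
      funext p
      rw [List.map_flatMap, List.flatMap_map]
      congr 1
      funext c
      simp

-- ===== VERDICT (by name: the statement is the Claim_ definition above) =====
theorem generate_all_solutions_spec : Claim_equal_generate_all_solutions := by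
  intro target _ _
  show generate_all_solutions target = generate_all_solutions_alt target
  unfold generate_all_solutions generate_all_solutions_alt
  dsimp only []
  rw [fold_prod (fun char => altCands (PySem.Str.find "isrveawhobpnutfg" (String.mk [char])))
        target.toList [[]],
      PySem.List.foldl_append_singleton_eq_map]
  simp [prodList, cands_eq]
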